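-- pv_equiv track=rewrite | github.com/jliao1/PythonStudy | LeetCode/String/Longest Semi Alternating九章基础班1课堂例4.py | longestSemiAlternatingSubstring1
-- ===== SOURCE A (Python) =====
-- def longestSemiAlternatingSubstring1(s):
--     # 比如  "baaabbabbb"
--     # 双指针  | |
--
--     k = 3       # 不能 contain k 个 identical consecutive chars, 本题k是3
--     n = len(s)  # 字符串长度
--
--     # edge case1：先处理异常
--     if s is None or n == 0:
--         return 0
--
--     # edge case2： 如果 输入的字符串s 长度小于3
--     if n < 3:
--         return n
--
--     currMaxLen = 1  # 或者取名叫 res 也行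
--     cnt = 1  # 由于 doesn't contain three identical consecutive characters
--              # 所以需要一个 cnt 来 count 最后一个char(也就是right指向的char) 连续出现的次数，当 >= 3 就不合法了
--              # 由于 left 从0开始，right 从1开始，所以 cnt 和 currMaxLen 初始都是1
--
--     left = 0  # 需要一个左指针，指向从 index = 0 开始
--     # for 的是 right右指针，right 从 index = 1 开始，正常来讲，right走到 s 结尾就停止啦。但是可以做个小优化，如果s剩余的 位数已经 <= currMaxLen了也就没必要往下扫了
--     for right in range(1, n):
--         # 先判断 right 是否等于 right 前一位
--         if s[right] == s[right - 1]:
--             # 若相等,说明多出现了1个连续相等char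
--             cnt += 1
--             # 如果已经连续k个char相等了，left～right之间框定的窗口就不合法了
--             if cnt == k:
--                 # 那就让窗口再次合法，那就把 left 移到 right 的前一位
--                 left = right - (k-2)
--
--                 # # 以下3行代码是个小优化，不写也行
--                 remainingLen = n - left
--                 if remainingLen <= currLen:
--                     return currMaxLen
--
--                 # 此时，由于left在right前一位，count该更新成 k-1（因为目前还是有2个char连续相等的）
--                 cnt = k - 1
--         else:  # right 不等于  right 向后移动一位
--             cnt = 1  # 重新把cnt更新成1 （因为连续没有一个char跟 right 指向的char相等，所以cnt是1）
--
--         currLen = right - left + 1     # 因为left只在count等于3时，才移到right前一位，所以这样是可以计算满足规则内的当前长度的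
--         currMaxLen = max(currMaxLen, currLen)  # 存下当前最大的 len
--
--     return currMaxLen
-- ===== SOURCE B (Python) =====
-- def longestSemiAlternatingSubstring1(s):
--     n = len(s)
--     if n == 0:
--         return 0
--     if n < 3:
--         return n
--     # phase 1: collect all cut indices i where s[i] == s[i-1] == s[i-2]
--     cuts = [i for i in range(2, n) if s[i] == s[i - 1] == s[i - 2]]
--     if not cuts:
--         return n
--     # phase 2: best span before the first cut, between consecutive cuts, and after the last
--     best = cuts[0]
--     prev = cuts[0]
--     for c in cuts[1:]:
--         best = max(best, c - prev + 1)
--         prev = c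
--     return max(best, n - prev + 1)
-- ===== Notes on version B (the rewrite author's own statement) =====
-- stated objective: alternative
-- what changed: Replaced the single stateful sliding-window scan (left pointer, run counter, early return) by a two-phase algorithm: first collect all triple-end cut indices, then compute the maximal span between consecutive cuts.
import Mathlib
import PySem

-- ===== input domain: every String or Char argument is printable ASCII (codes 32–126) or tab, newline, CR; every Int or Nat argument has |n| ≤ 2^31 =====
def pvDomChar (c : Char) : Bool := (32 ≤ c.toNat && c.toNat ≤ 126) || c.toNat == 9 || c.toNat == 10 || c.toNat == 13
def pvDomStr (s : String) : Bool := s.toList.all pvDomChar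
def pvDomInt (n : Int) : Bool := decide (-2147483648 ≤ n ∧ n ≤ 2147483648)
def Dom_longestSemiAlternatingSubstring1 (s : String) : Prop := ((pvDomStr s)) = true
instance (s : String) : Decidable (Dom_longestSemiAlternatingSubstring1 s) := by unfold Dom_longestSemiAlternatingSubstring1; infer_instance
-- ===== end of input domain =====

-- B replaces A's single stateful sliding-window scan by a two-phase pass (collect triple-end
-- cut indices, then take the maximal span between consecutive cuts); same O(n) cost (objective: alternative).

-- ===== PORT A =====
-- A's for-loop over range(1, n); state (currMaxLen, cnt, left, currLen); the early
-- `return currMaxLen` is the first branch's direct result.  `currLen` is undefined in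
-- Python before the first iteration and is first read only when cnt reaches 3 (which
-- needs right ≥ 2, after an assignment); it is initialised to 0 here, never read before set.
-- Indices right, right-1 are always in range (1 ≤ right < n), so pyGetD is exact for s[.].
def pvALoop (l : List Char) (n : Int) : List Int → Int → Int → Int → Int → Int
  | [], cml, _cnt, _left, _currLen => cml
  | r :: rest, cml, cnt, left, currLen =>
    if PySem.List.pyGetD l r ' ' == PySem.List.pyGetD l (r - 1) ' ' then
      if cnt + 1 == 3 then
        if n - (r - 1) ≤ currLen then cml
        else pvALoop l n rest (max cml (r - (r - 1) + 1)) 2 (r - 1) (r - (r - 1) + 1)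
      else pvALoop l n rest (max cml (r - left + 1)) (cnt + 1) left (r - left + 1)
    else pvALoop l n rest (max cml (r - left + 1)) 1 left (r - left + 1)

def longestSemiAlternatingSubstring1 (s : String) : Int :=
  if ((s.toList.length : Int)) == 0 then 0
  else if ((s.toList.length : Int)) < 3 then (s.toList.length : Int)
  else pvALoop s.toList (s.toList.length : Int) (PySem.List.pyRange 1 (s.toList.length : Int) 1) 1 1 0 0

-- ===== PORT B =====
-- s[i] == s[i-1] == s[i-2] (indices in range since 2 ≤ i < n, so pyGetD is exact)
def pvCut (l : List Char) (i : Int) : Bool :=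
  PySem.List.pyGetD l i ' ' == PySem.List.pyGetD l (i - 1) ' ' &&
  PySem.List.pyGetD l (i - 1) ' ' == PySem.List.pyGetD l (i - 2) ' '

def longestSemiAlternatingSubstring1_alt (s : String) : Int :=
  if ((s.toList.length : Int)) == 0 then 0
  else if ((s.toList.length : Int)) < 3 then (s.toList.length : Int)
  else
    match (PySem.List.pyRange 2 (s.toList.length : Int) 1).filter (pvCut s.toList) with
    | [] => (s.toList.length : Int)
    | c :: rest =>
      max (rest.foldl (fun (bp : Int × Int) c => (max bp.1 (c - bp.2 + 1), c)) (c, c)).1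
          ((s.toList.length : Int) - (rest.foldl (fun (bp : Int × Int) c => (max bp.1 (c - bp.2 + 1), c)) (c, c)).2 + 1)

-- ===== PRECONDITION & SPEC =====
def Spec_longestSemiAlternatingSubstring1 (s : String) (out : Int) : Prop := out = longestSemiAlternatingSubstring1_alt s
instance (s : String) (out : Int) : Decidable (Spec_longestSemiAlternatingSubstring1 s out) := by unfold Spec_longestSemiAlternatingSubstring1; infer_instance

-- ===== CLAIM (what is proved, stated in full; the proofs are below) =====
def Claim_equal_longestSemiAlternatingSubstring1 : Prop := ∀ (s : String), Dom_longestSemiAlternatingSubstring1 s → Spec_longestSemiAlternatingSubstring1 s (longestSemiAlternatingSubstring1 s)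

-- ===== LEMMAS AND PROOFS =====

-- the best valid span when the window's left edge is at `left` and the remaining cuts are `cs`
def pvTail (n left : Int) : List Int → Int
  | [] => n - left
  | c :: cs => max (c - left) (pvTail n (c - 1) cs)

-- the cut indices in [r, n)
def pvCuts (l : List Char) (n r : Int) : List Int := (PySem.List.pyRange r n 1).filter (pvCut l)

lemma pvCuts_nil (l : List Char) (n r : Int) (h : n ≤ r) : pvCuts l n r = [] := by
  simp [pvCuts, PySem.List.pyRange_one_eq_nil h]

lemma pvCuts_cons (l : List Char) (n r : Int) (h : r < n) :
    pvCuts l n r = if pvCut l r then r :: pvCuts l n (r + 1) else pvCuts l n (r + 1) := by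
  rcases Bool.dichotomy (pvCut l r) with hc | hc <;>
    simp only [pvCuts, PySem.List.pyRange_one_cons h, List.filter_cons, hc]

lemma mem_pvCuts (l : List Char) (n r c : Int) (h : c ∈ pvCuts l n r) : r ≤ c ∧ c < n := by
  have := (List.mem_filter.mp h).1
  exact (PySem.List.mem_pyRange_one).mp this

lemma pairwise_pvCuts (l : List Char) (n r : Int) : (pvCuts l n r).Pairwise (· < ·) :=
  (PySem.List.pairwise_lt_pyRange_one r n).filter _

lemma pvTail_le (n : Int) : ∀ (cs : List Int) (left : Int), cs.Pairwise (· < ·) →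
    (∀ c ∈ cs, left < c ∧ c < n) → pvTail n left cs ≤ n - left := by
  intro cs
  induction cs with
  | nil => intro left _ _; simp [pvTail]
  | cons c cs ih =>
    intro left hp hm
    have h1 := hm c (List.mem_cons_self ..)
    have h2 := ih (c - 1) hp.of_cons (by
      intro c' hc'
      exact ⟨by have := (List.pairwise_cons.mp hp).1 c' hc'; omega, (hm c' (List.mem_cons_of_mem _ hc')).2⟩)
    simp only [pvTail]
    omega

lemma pvTail_ge (n m : Int) (cs : List Int) (left : Int) (h1 : m ≤ n) (h2 : ∀ c ∈ cs, m ≤ c) :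
    m - left ≤ pvTail n left cs := by
  cases cs with
  | nil => simp only [pvTail]; omega
  | cons c cs =>
    have := h2 c (List.mem_cons_self ..)
    simp only [pvTail]
    omega

-- B's fold over the remaining cuts computes pvTail
lemma foldB (n : Int) : ∀ (cs : List Int) (best prev : Int),
    max (cs.foldl (fun (bp : Int × Int) c => (max bp.1 (c - bp.2 + 1), c)) (best, prev)).1
        (n - (cs.foldl (fun (bp : Int × Int) c => (max bp.1 (c - bp.2 + 1), c)) (best, prev)).2 + 1)
    = max best (pvTail n (prev - 1) cs) := by
  intro cs
  induction cs with
  | nil => intro best prev; simp only [List.foldl_nil, pvTail]; omega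
  | cons c cs ih =>
    intro best prev
    simp only [List.foldl_cons, pvTail]
    rw [ih]
    omega

-- the window-scan invariant: A's loop from position r equals the best of cml and pvTail
lemma loop_eq (l : List Char) (n : Int) : ∀ (k : Nat) (r cml left cnt : Int),
    n = r + k → 2 ≤ r → 0 ≤ left → left ≤ r - 2 → r - left ≤ cml →
    cnt = (if PySem.List.pyGetD l (r - 1) ' ' == PySem.List.pyGetD l (r - 2) ' ' then 2 else 1) →
    pvALoop l n (PySem.List.pyRange r n 1) cml cnt left (r - left)
    = max cml (pvTail n left (pvCuts l n r)) := by
  intro k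
  induction k with
  | zero =>
    intro r cml left cnt hk hr hl0 hl2 hcml hcnt
    rw [PySem.List.pyRange_one_eq_nil (by omega), pvCuts_nil l n r (by omega)]
    simp only [pvALoop, pvTail]
    omega
  | succ k ih =>
    intro r cml left cnt hk hr hl0 hl2 hcml hcnt
    have hrn : r < n := by omega
    rw [PySem.List.pyRange_one_cons hrn]
    simp only [pvALoop]
    by_cases h01 : (PySem.List.pyGetD l r ' ' == PySem.List.pyGetD l (r - 1) ' ') = true
    · rw [if_pos h01]
      by_cases h12 : (PySem.List.pyGetD l (r - 1) ' ' == PySem.List.pyGetD l (r - 2) ' ') = true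
      · -- cut at r: cnt = 2
        have hc2 : cnt = 2 := by rw [hcnt, if_pos h12]
        subst hc2
        rw [if_pos (by decide : (((2:Int) + 1) == 3) = true)]
        have hcut : pvCut l r = true := by simp [pvCut, h01, h12]
        have hcuts : pvCuts l n r = r :: pvCuts l n (r + 1) := by
          rw [pvCuts_cons l n r hrn, if_pos hcut]
        have hmem := fun c hc => mem_pvCuts l n (r + 1) c hc
        have htle : pvTail n (r - 1) (pvCuts l n (r + 1)) ≤ n - (r - 1) :=
          pvTail_le n _ _ (pairwise_pvCuts l n (r + 1))
            (fun c hc => ⟨by have := hmem c hc; omega, (hmem c hc).2⟩)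
        have htge : 2 ≤ pvTail n (r - 1) (pvCuts l n (r + 1)) := by
          have := pvTail_ge n (r + 1) (pvCuts l n (r + 1)) (r - 1) (by omega)
            (fun c hc => (hmem c hc).1)
          omega
        by_cases hearly : n - (r - 1) ≤ r - left
        · rw [if_pos hearly, hcuts]
          simp only [pvTail]
          omega
        · rw [if_neg hearly]
          have hcall := ih (r + 1) (max cml (r - (r - 1) + 1)) (r - 1) 2
            (by omega) (by omega) (by omega) (by omega) (by omega)
            (by rw [show ((r:Int) + 1 - 1) = r by omega, show ((r:Int) + 1 - 2) = r - 1 by omega,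
                    if_pos h01])
          rw [show ((r:Int) + 1 - (r - 1)) = r - (r - 1) + 1 by omega] at hcall
          rw [hcall, hcuts]
          simp only [pvTail]
          omega
      · -- s[r] == s[r-1] but no triple: cnt = 1
        have hc1 : cnt = 1 := by rw [hcnt, if_neg h12]
        subst hc1
        rw [if_neg (by decide : ¬ (((1:Int) + 1) == 3) = true)]
        have hcut : pvCut l r = false := by
          rw [Bool.not_eq_true] at h12
          simp [pvCut, h12]
        have hcuts : pvCuts l n r = pvCuts l n (r + 1) := by
          rw [pvCuts_cons l n r hrn, if_neg (by simp [hcut])]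
        have hmem := fun c hc => mem_pvCuts l n (r + 1) c hc
        have htge : (r + 1) - left ≤ pvTail n left (pvCuts l n (r + 1)) :=
          pvTail_ge n (r + 1) _ left (by omega) (fun c hc => (hmem c hc).1)
        have hcall := ih (r + 1) (max cml (r - left + 1)) left (1 + 1)
          (by omega) (by omega) (by omega) (by omega) (by omega)
          (by rw [show ((r:Int) + 1 - 1) = r by omega, show ((r:Int) + 1 - 2) = r - 1 by omega,
                  if_pos h01]; norm_num)
        rw [show ((r:Int) + 1 - left) = r - left + 1 by omega] at hcall
        rw [hcall, hcuts]
        omega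
    · -- s[r] ≠ s[r-1]
      rw [if_neg h01]
      have hcut : pvCut l r = false := by
        rw [Bool.not_eq_true] at h01
        simp [pvCut, h01]
      have hcuts : pvCuts l n r = pvCuts l n (r + 1) := by
        rw [pvCuts_cons l n r hrn, if_neg (by simp [hcut])]
      have hmem := fun c hc => mem_pvCuts l n (r + 1) c hc
      have htge : (r + 1) - left ≤ pvTail n left (pvCuts l n (r + 1)) :=
        pvTail_ge n (r + 1) _ left (by omega) (fun c hc => (hmem c hc).1)
      have hcall := ih (r + 1) (max cml (r - left + 1)) left 1
        (by omega) (by omega) (by omega) (by omega) (by omega)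
        (by rw [show ((r:Int) + 1 - 1) = r by omega, show ((r:Int) + 1 - 2) = r - 1 by omega,
                if_neg h01])
      rw [show ((r:Int) + 1 - left) = r - left + 1 by omega] at hcall
      rw [hcall, hcuts]
      omega

-- the whole computation, over the character list, in the main case 3 ≤ n
lemma main_list (l : List Char) (h3 : 3 ≤ (l.length : Int)) :
    pvALoop l (l.length : Int) (PySem.List.pyRange 1 (l.length : Int) 1) 1 1 0 0
    = (match (PySem.List.pyRange 2 (l.length : Int) 1).filter (pvCut l) with
       | [] => ((l.length : Int))
       | c :: rest =>
         max (rest.foldl (fun (bp : Int × Int) c => (max bp.1 (c - bp.2 + 1), c)) (c, c)).1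
             ((l.length : Int) - (rest.foldl (fun (bp : Int × Int) c => (max bp.1 (c - bp.2 + 1), c)) (c, c)).2 + 1)) := by
  set n : Int := (l.length : Int) with hn
  have key : ∀ cnt : Int,
      cnt = (if PySem.List.pyGetD l 1 ' ' == PySem.List.pyGetD l 0 ' ' then 2 else 1) →
      pvALoop l n (PySem.List.pyRange 2 n 1) 2 cnt 0 2 = max 2 (pvTail n 0 (pvCuts l n 2)) := by
    intro cnt hcnt
    have := loop_eq l n (n - 2).toNat 2 2 0 cnt (by omega) (by omega) (by omega) (by omega)
      (by omega)
      (by rw [hcnt]; norm_num)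
    simpa using this
  have hA : pvALoop l n (PySem.List.pyRange 1 n 1) 1 1 0 0 = max 2 (pvTail n 0 (pvCuts l n 2)) := by
    rw [PySem.List.pyRange_one_cons (by omega : (1:Int) < n)]
    simp only [pvALoop]
    rw [if_neg (by decide : ¬ (((1:Int) + 1) == 3) = true)]
    norm_num
    by_cases h : PySem.List.pyGetD l 1 ' ' = PySem.List.pyGetD l 0 ' '
    · rw [if_pos h]
      exact key 2 (by rw [if_pos (beq_iff_eq.mpr h)])
    · rw [if_neg h]
      exact key 1 (by rw [if_neg (by simpa using h)])
  rw [hA, show (PySem.List.pyRange 2 n 1).filter (pvCut l) = pvCuts l n 2 from rfl]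
  cases hc : pvCuts l n 2 with
  | nil =>
    show max 2 (pvTail n 0 ([] : List Int)) = n
    simp only [pvTail]
    omega
  | cons c rest =>
    have hcm : 2 ≤ c := (mem_pvCuts l n 2 c (by rw [hc]; exact List.mem_cons_self ..)).1
    show max 2 (pvTail n 0 (c :: rest)) =
      max (rest.foldl (fun (bp : Int × Int) c => (max bp.1 (c - bp.2 + 1), c)) (c, c)).1
          (n - (rest.foldl (fun (bp : Int × Int) c => (max bp.1 (c - bp.2 + 1), c)) (c, c)).2 + 1)
    rw [foldB n rest c c]
    simp only [pvTail]
    omega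

-- ===== VERDICT (by name: the statement is the Claim_ definition above) =====
theorem longestSemiAlternatingSubstring1_spec : Claim_equal_longestSemiAlternatingSubstring1 := by
  intro s _
  unfold Spec_longestSemiAlternatingSubstring1 longestSemiAlternatingSubstring1 longestSemiAlternatingSubstring1_alt
  by_cases h0 : (((s.toList.length : Int)) == 0) = true
  · rw [if_pos h0, if_pos h0]
  · rw [if_neg h0, if_neg h0]
    by_cases h3 : ((s.toList.length : Int)) < 3
    · rw [if_pos h3, if_pos h3]
    · rw [if_neg h3, if_neg h3]
      exact main_list s.toList (by omega)
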